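-- pv_equiv track=rewrite | github.com/JB243/nate9389 | Python/A_Collection_of_Useful_Functions_in_Python.py | str_omit_forward
-- ===== SOURCE A (Python) =====
-- def str_omit_forward(_str, n):
--     s = ''
--     count = 0
--     for char in _str:
--         count = count + 1
--         if count > n:
--             s = s + char
--     return s
-- ===== SOURCE B (Python) =====
-- def str_omit_forward(_str, n):
--     return _str[max(0, n):]
-- ===== Notes on version B (the rewrite author's own statement) =====
-- stated objective: simpler
-- what changed: Replaced the character-counting loop with a single closed-form slice _str[max(0,n):]; max(0,n) gives the loop's behaviour that negative n keeps the whole string.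
import Mathlib
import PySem

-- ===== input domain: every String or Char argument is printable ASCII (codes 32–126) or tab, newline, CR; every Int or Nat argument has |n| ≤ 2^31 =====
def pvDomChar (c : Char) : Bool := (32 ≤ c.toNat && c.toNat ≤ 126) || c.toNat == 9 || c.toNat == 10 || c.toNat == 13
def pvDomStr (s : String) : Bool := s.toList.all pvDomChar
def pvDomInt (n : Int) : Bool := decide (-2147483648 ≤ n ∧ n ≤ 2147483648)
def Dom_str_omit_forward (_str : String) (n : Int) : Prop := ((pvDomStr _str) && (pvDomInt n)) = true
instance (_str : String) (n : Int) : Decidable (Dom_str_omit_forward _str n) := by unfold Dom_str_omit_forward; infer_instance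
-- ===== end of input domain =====

-- B replaces A's character-counting accumulation loop with one closed-form slice (simpler).

-- ===== PORT A =====
-- loop state: (s, count); for each char, count += 1 and append char when count > n
def str_omit_forward (_str : String) (n : Int) : String :=
  let st := _str.toList.foldl
    (fun (st : String × Int) (char : Char) =>
      let count := st.2 + 1
      (if count > n then st.1.push char else st.1, count))
    ("", 0)
  st.1

-- ===== PORT B =====
-- _str[max(0, n):]
def str_omit_forward_alt (_str : String) (n : Int) : String :=
  PySem.Str.slice _str (some (max 0 n)) none

-- ===== PRECONDITION & SPEC =====
def Spec_str_omit_forward (_str : String) (n : Int) (out : String) : Prop := out = str_omit_forward_alt _str n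
instance (_str : String) (n : Int) (out : String) : Decidable (Spec_str_omit_forward _str n out) := by unfold Spec_str_omit_forward; infer_instance

-- ===== CLAIM (what is proved, stated in full; the proofs are below) =====
def Claim_equal_str_omit_forward : Prop := ∀ (_str : String) (n : Int), Dom_str_omit_forward _str n → Spec_str_omit_forward _str n (str_omit_forward _str n)

-- ===== LEMMAS AND PROOFS =====

-- loop invariant: the fold appends exactly the characters past the first (n - c0) ones
theorem str_omit_forward_fold (n : Int) (l : List Char) (s0 : String) (c0 : Int) :
    (l.foldl
      (fun (st : String × Int) (char : Char) =>
        let count := st.2 + 1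
        (if count > n then st.1.push char else st.1, count))
      (s0, c0)).1 = s0 ++ String.ofList (l.drop (n - c0).toNat) := by
  induction l generalizing s0 c0 with
  | nil => simp
  | cons c l ih =>
    simp only [List.foldl_cons]
    rw [ih]
    by_cases h : c0 + 1 > n
    · have h0 : (n - c0).toNat = 0 := by omega
      have h1 : (n - (c0 + 1)).toNat = 0 := by omega
      simp only [h, if_pos, h0, h1, List.drop_zero]
      apply String.ext
      simp
    · have h0 : (n - c0).toNat = (n - (c0 + 1)).toNat + 1 := by omega
      simp [h, h0]

theorem str_omit_forward_spec : Claim_equal_str_omit_forward := by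
  intro _str n _
  unfold Spec_str_omit_forward str_omit_forward str_omit_forward_alt
  rw [str_omit_forward_fold]
  have h1 : (PySem.Str.slice _str (some (max 0 n)) none).toList
      = _str.toList.drop (max 0 n).toNat := by
    rw [PySem.Str.toList_slice, PySem.Chars.slice_eq_listSlice,
        PySem.List.slice_from _ (by omega)]
  apply String.ext
  simp [h1]
  omega
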